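-- pv_equiv track=rewrite | github.com/4inzler/model | sel_discord.py | _mentions_memory
-- ===== SOURCE A (Python) =====
-- def _mentions_memory(text: str) -> bool:
--     lowered = text.lower()
--     return any(
--         phrase in lowered
--         for phrase in (
--             "remember when",
--             "as you said",
--             "like you mentioned",
--             "last time you",
--             "the meme you liked",
--         )
--     )
-- ===== SOURCE B (Python) =====
-- _PHRASES = (
--     "remember when",
--     "as you said",
--     "like you mentioned",
--     "last time you",
--     "the meme you liked",
-- )
--
--
-- def _mentions_memory(text: str) -> bool:
--     # Single left-to-right pass over positions: at each offset test whether any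
--     # phrase starts there, instead of five independent substring scans.
--     lowered = text.lower()
--     for i in range(len(lowered)):
--         for p in _PHRASES:
--             if lowered.startswith(p, i):
--                 return True
--     return False
-- ===== Notes on version B (the rewrite author's own statement) =====
-- stated objective: alternative
-- what changed: Replaces five independent substring-containment scans (one per phrase) with a single left-to-right pass over text positions that tests at each offset whether any phrase starts there via startswith with an offset.
import Mathlib
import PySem

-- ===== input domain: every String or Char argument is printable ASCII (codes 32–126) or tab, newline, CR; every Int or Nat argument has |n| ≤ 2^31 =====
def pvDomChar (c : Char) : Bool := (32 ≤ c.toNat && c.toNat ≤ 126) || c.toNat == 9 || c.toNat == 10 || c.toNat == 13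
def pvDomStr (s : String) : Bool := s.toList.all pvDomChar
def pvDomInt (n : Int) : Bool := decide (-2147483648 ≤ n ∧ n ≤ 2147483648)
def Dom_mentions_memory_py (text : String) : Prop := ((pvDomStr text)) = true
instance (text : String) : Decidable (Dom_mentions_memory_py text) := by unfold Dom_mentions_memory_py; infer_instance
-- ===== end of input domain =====

-- B replaces A's five independent substring scans by one pass over positions testing each phrase
-- with an offset startswith (objective: alternative; same asymptotic cost).

-- ===== PORT A =====
def aPhrases_mm : List String :=
  ["remember when", "as you said", "like you mentioned", "last time you", "the meme you liked"]

def mentions_memory_py (text : String) : Bool :=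
  let lowered := PySem.Str.lower text
  aPhrases_mm.any (fun phrase => PySem.Str.isIn phrase lowered)

-- ===== PORT B =====
-- `lowered.startswith(p, i)` with 0 ≤ i ≤ len is exactly 'p is a prefix of lowered[i:]',
-- i.e. PySem.Chars.startswith on (toList.drop i) — exact on this range of i.
def mentions_memory_py_alt (text : String) : Bool :=
  let lowered := PySem.Str.lower text
  (List.range lowered.toList.length).any (fun i =>
    aPhrases_mm.any (fun p => PySem.Chars.startswith (lowered.toList.drop i) p.toList))

-- ===== PRECONDITION & SPEC =====
def Spec_mentions_memory_py (text : String) (out : Bool) : Prop := out = mentions_memory_py_alt text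
instance (text : String) (out : Bool) : Decidable (Spec_mentions_memory_py text out) := by unfold Spec_mentions_memory_py; infer_instance

-- ===== CLAIM (what is proved, stated in full; the proofs are below) =====
def Claim_equal_mentions_memory_py : Prop := ∀ (text : String), Dom_mentions_memory_py text → Spec_mentions_memory_py text (mentions_memory_py text)

-- ===== LEMMAS AND PROOFS =====

-- One nonempty phrase: substring scan = per-position prefix scan.
theorem isIn_eq_any_range (p : String) (L : List Char) (hp : p.toList ≠ []) :
    PySem.Chars.isIn p.toList L =
      (List.range L.length).any (fun i => PySem.Chars.startswith (L.drop i) p.toList) := by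
  rw [Bool.eq_iff_iff]
  rw [PySem.Chars.isIn_iff_infix]
  simp only [List.any_eq_true, List.mem_range, PySem.Chars.startswith_iff]
  constructor
  · intro h
    obtain ⟨j, hj⟩ := (PySem.Chars.exists_prefix_drop_iff_isIn p.toList L).2
      ((PySem.Chars.isIn_iff_infix _ _).2 h)
    by_cases hjl : j < L.length
    · exact ⟨j, hjl, hj⟩
    · exfalso
      rw [List.drop_eq_nil_of_le (by omega)] at hj
      exact hp (List.prefix_nil.mp hj)
  · rintro ⟨i, _, hi⟩
    exact (PySem.Chars.isIn_iff_infix _ _).1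
      ((PySem.Chars.exists_prefix_drop_iff_isIn p.toList L).1 ⟨i, hi⟩)

-- ===== VERDICT (by name: the statement is the Claim_ definition above) =====
theorem mentions_memory_py_spec : Claim_equal_mentions_memory_py := by
  intro text _
  unfold Spec_mentions_memory_py mentions_memory_py mentions_memory_py_alt aPhrases_mm
  simp only [PySem.Str.isIn_eq]
  set L := (PySem.Str.lower text).toList with hL
  rw [Bool.eq_iff_iff]
  simp only [List.any_cons, List.any_nil, Bool.or_false]
  rw [isIn_eq_any_range "remember when" L (by decide),
    isIn_eq_any_range "as you said" L (by decide),
    isIn_eq_any_range "like you mentioned" L (by decide),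
    isIn_eq_any_range "last time you" L (by decide),
    isIn_eq_any_range "the meme you liked" L (by decide)]
  simp only [Bool.or_eq_true, List.any_eq_true, List.mem_range]
  constructor
  · rintro (⟨i, h, hp⟩ | ⟨i, h, hp⟩ | ⟨i, h, hp⟩ | ⟨i, h, hp⟩ | ⟨i, h, hp⟩)
    · exact ⟨i, h, Or.inl hp⟩
    · exact ⟨i, h, Or.inr (Or.inl hp)⟩
    · exact ⟨i, h, Or.inr (Or.inr (Or.inl hp))⟩
    · exact ⟨i, h, Or.inr (Or.inr (Or.inr (Or.inl hp)))⟩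
    · exact ⟨i, h, Or.inr (Or.inr (Or.inr (Or.inr hp)))⟩
  · rintro ⟨i, h, hp | hp | hp | hp | hp⟩
    · exact Or.inl ⟨i, h, hp⟩
    · exact Or.inr (Or.inl ⟨i, h, hp⟩)
    · exact Or.inr (Or.inr (Or.inl ⟨i, h, hp⟩))
    · exact Or.inr (Or.inr (Or.inr (Or.inl ⟨i, h, hp⟩)))
    · exact Or.inr (Or.inr (Or.inr (Or.inr ⟨i, h, hp⟩)))
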